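-- pv_equiv track=rewrite | github.com/witekosz/checkio-solutions-py | escher/the-ship-teams.py | two_teams
-- ===== SOURCE A (Python) =====
-- def two_teams(sailors: dict) -> list:
--     list_20_40 = []
--     list_other = []
--
--     for k, v in sailors.items():
--         if v < 20 or v > 40:
--             list_20_40.append(k)
--         else:
--             list_other.append(k)
--
--     list_20_40_sort = sorted(list_20_40)
--     list_other_sort = sorted(list_other)
--     list_of_lists = []
--     list_of_lists.append(list_20_40_sort)
--     list_of_lists.append(list_other_sort)
--     return list_of_lists
-- ===== SOURCE B (Python) =====
-- def two_teams(sailors: dict) -> list: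
--     # Online insertion sort: each name is inserted into its (always-sorted)
--     # group at the right position as we go; no sorted() call anywhere.
--     teams = [[], []]
--     for name, age in sailors.items():
--         group = teams[0] if age < 20 or age > 40 else teams[1]
--         i = 0
--         while i < len(group) and group[i] < name:
--             i += 1
--         group.insert(i, name)
--     return teams
-- ===== Notes on version B (the rewrite author's own statement) =====
-- stated objective: alternative
-- what changed: B never calls sorted(): it maintains the two groups as always-sorted lists, inserting each name at its ordered position (online insertion sort) during the single pass over the items, instead of A's collect-then-sort of each group.
import Mathlib
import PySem

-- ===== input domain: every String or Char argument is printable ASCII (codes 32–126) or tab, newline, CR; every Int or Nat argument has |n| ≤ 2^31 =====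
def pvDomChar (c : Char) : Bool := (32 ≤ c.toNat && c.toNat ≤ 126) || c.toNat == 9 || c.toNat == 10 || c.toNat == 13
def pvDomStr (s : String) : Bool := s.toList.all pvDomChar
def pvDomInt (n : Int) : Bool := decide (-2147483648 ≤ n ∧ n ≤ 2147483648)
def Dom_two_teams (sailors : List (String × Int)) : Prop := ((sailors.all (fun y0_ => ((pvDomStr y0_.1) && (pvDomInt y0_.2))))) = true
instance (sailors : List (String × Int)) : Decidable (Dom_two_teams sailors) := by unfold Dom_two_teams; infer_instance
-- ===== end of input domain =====

-- B replaces A's collect-then-sort-each-group with online ordered insertion: no sort call.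

-- ===== PORT A =====
-- for k, v in sailors.items(): append k to list_20_40 or list_other; then sort each.
def two_teams (sailors : List (String × Int)) : List (List String) :=
  let st := sailors.foldl
    (fun (acc : List String × List String) kv =>
      if kv.2 < 20 ∨ kv.2 > 40 then (acc.1 ++ [kv.1], acc.2) else (acc.1, acc.2 ++ [kv.1]))
    ([], [])
  let list_20_40_sort := PySem.List.sorted st.1 (fun x => x) false
  let list_other_sort := PySem.List.sorted st.2 (fun x => x) false
  [list_20_40_sort, list_other_sort]

-- ===== PORT B =====
-- the while-loop + group.insert(i, name): walk past smaller elements, splice name in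
def insName (group : List String) (name : String) : List String :=
  match group with
  | [] => [name]
  | x :: t => if x < name then x :: insName t name else name :: x :: t

-- one pass over items(), inserting each name into its always-sorted group
def two_teams_alt (sailors : List (String × Int)) : List (List String) :=
  let teams := sailors.foldl
    (fun (acc : List String × List String) kv =>
      if kv.2 < 20 ∨ kv.2 > 40 then (insName acc.1 kv.1, acc.2) else (acc.1, insName acc.2 kv.1))
    ([], [])
  [teams.1, teams.2]

-- ===== PRECONDITION & SPEC =====
def Spec_two_teams (sailors : List (String × Int)) (out : List (List String)) : Prop := out = two_teams_alt sailors
instance (sailors : List (String × Int)) (out : List (List String)) : Decidable (Spec_two_teams sailors out) := by unfold Spec_two_teams; infer_instance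

-- ===== CLAIM (what is proved, stated in full; the proofs are below) =====
def Claim_equal_two_teams : Prop := ∀ (sailors : List (String × Int)), Dom_two_teams sailors → Spec_two_teams sailors (two_teams sailors)

-- ===== LEMMAS AND PROOFS =====

theorem insName_perm (g : List String) (n : String) : (insName g n).Perm (n :: g) := by
  induction g with
  | nil => simp [insName]
  | cons x t ih =>
    by_cases h : x < n
    · simpa [insName, h] using ((ih.cons x).trans (List.Perm.swap n x t))
    · simp [insName, h]

theorem insName_pairwise (g : List String) (n : String)
    (hg : g.Pairwise (· ≤ ·)) : (insName g n).Pairwise (· ≤ ·) := by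
  induction g with
  | nil => simp [insName]
  | cons x t ih =>
    rw [List.pairwise_cons] at hg
    obtain ⟨hx, ht⟩ := hg
    by_cases h : x < n
    · rw [insName, if_pos h, List.pairwise_cons]
      refine ⟨?_, ih ht⟩
      intro y hy
      have hy' : y = n ∨ y ∈ t := by
        have hm := (insName_perm t n).mem_iff.mp hy
        simpa using hm
      rcases hy' with rfl | hyt
      · exact le_of_lt h
      · exact hx y hyt
    · rw [insName, if_neg h, List.pairwise_cons]
      refine ⟨?_, List.pairwise_cons.mpr ⟨hx, ht⟩⟩
      intro y hy
      have hy' : y = x ∨ y ∈ t := by simpa using hy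
      rcases hy' with rfl | hyt
      · exact le_of_not_gt h
      · exact le_trans (le_of_not_gt h) (hx y hyt)

-- A's two-accumulator append fold is (filter p, filter ¬p) of the keys
theorem partition_fold (p : String × Int → Prop) [DecidablePred p] (l : List (String × Int)) (a b : List String) :
    l.foldl (fun (acc : List String × List String) kv =>
        if p kv then (acc.1 ++ [kv.1], acc.2) else (acc.1, acc.2 ++ [kv.1])) (a, b)
      = (a ++ (l.filter (fun kv => decide (p kv))).map Prod.fst,
         b ++ (l.filter (fun kv => !decide (p kv))).map Prod.fst) := by
  induction l generalizing a b with
  | nil => simp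
  | cons x t ih => by_cases h : p x <;> simp [List.foldl_cons, h, ih]

-- B's two-accumulator insertion fold routes the same filtered key lists through insName
theorem ins_fold (p : String × Int → Prop) [DecidablePred p] (l : List (String × Int)) (a b : List String) :
    l.foldl (fun (acc : List String × List String) kv =>
        if p kv then (insName acc.1 kv.1, acc.2) else (acc.1, insName acc.2 kv.1)) (a, b)
      = (((l.filter (fun kv => decide (p kv))).map Prod.fst).foldl insName a,
         ((l.filter (fun kv => !decide (p kv))).map Prod.fst).foldl insName b) := by
  induction l generalizing a b with
  | nil => simp
  | cons x t ih => by_cases h : p x <;> simp [List.foldl_cons, h, ih]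

-- folding insName from [] is a sorted permutation, hence equals the stable identity sort
theorem foldl_insName_perm (xs : List String) (a : List String) :
    (xs.foldl insName a).Perm (a ++ xs) := by
  induction xs generalizing a with
  | nil => simp
  | cons x t ih =>
    have h1 : (t.foldl insName (insName a x)).Perm (insName a x ++ t) := ih _
    have h2 : (insName a x ++ t).Perm ((x :: a) ++ t) := (insName_perm a x).append_right t
    have h3 : ((x :: a) ++ t).Perm (a ++ x :: t) := List.perm_middle.symm
    exact (h1.trans h2).trans h3

theorem foldl_insName_pairwise (xs : List String) (a : List String)
    (ha : a.Pairwise (· ≤ ·)) : (xs.foldl insName a).Pairwise (· ≤ ·) := by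
  induction xs generalizing a with
  | nil => exact ha
  | cons x t ih => exact ih _ (insName_pairwise a x ha)

theorem foldl_insName_eq_sorted (xs : List String) :
    xs.foldl insName [] = PySem.List.sorted xs (fun x => x) false := by
  refine (PySem.List.sorted_id_eq_of_perm_of_pairwise xs _ ?_ ?_).symm
  · simpa using foldl_insName_perm xs []
  · exact foldl_insName_pairwise xs [] (by simp)

-- ===== VERDICT (by name: the statement is the Claim_ definition above) =====
theorem two_teams_spec : Claim_equal_two_teams := by
  intro sailors _
  unfold Spec_two_teams two_teams two_teams_alt
  dsimp only
  rw [partition_fold (fun kv : String × Int => kv.2 < 20 ∨ kv.2 > 40),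
    ins_fold (fun kv : String × Int => kv.2 < 20 ∨ kv.2 > 40)]
  simp only [List.nil_append]
  rw [foldl_insName_eq_sorted, foldl_insName_eq_sorted]
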